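-- pv_equiv track=rewrite | github.com/fawaz-dabbaghieh/metadata_fixer | samples_key_filtering.py | filtering_keys
-- ===== SOURCE A (Python) =====
-- def filtering_keys(original_keys, new_file):
-- 	new_fixed_file = []
-- 	for i in range(0,len(original_keys)):
-- 		for l in new_file:
-- 			if l[0] == original_keys[i]:
-- 				new_line = "\t".join(l)
-- 				new_fixed_file.append(new_line)
-- 	return new_fixed_file
-- ===== SOURCE B (Python) =====
-- def filtering_keys(original_keys, new_file):
--     out = []
--     if original_keys:
--         index = {}
--         for l in new_file:
--             index.setdefault(l[0], []).append("\t".join(l))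
--         for k in original_keys:
--             out += index.get(k, [])
--     return out
-- ===== Notes on version B (the rewrite author's own statement) =====
-- stated objective: alternative
-- what changed: B builds a dict index from line head to joined lines in one pass over new_file (only when there are keys at all), then concatenates per key, instead of rescanning new_file for every key.
import Mathlib
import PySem

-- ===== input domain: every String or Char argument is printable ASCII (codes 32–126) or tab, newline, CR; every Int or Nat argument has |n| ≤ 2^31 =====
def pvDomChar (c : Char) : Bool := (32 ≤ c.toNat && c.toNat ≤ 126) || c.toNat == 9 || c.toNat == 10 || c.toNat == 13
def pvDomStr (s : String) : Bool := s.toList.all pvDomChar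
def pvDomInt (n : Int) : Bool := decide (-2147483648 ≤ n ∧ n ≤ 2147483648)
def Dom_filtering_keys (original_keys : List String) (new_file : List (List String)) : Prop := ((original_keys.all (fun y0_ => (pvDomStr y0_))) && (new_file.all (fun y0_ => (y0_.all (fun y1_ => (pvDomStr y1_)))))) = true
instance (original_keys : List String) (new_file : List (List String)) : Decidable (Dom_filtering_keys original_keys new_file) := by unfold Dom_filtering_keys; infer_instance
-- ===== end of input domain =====

-- ===== PORT A =====

-- B replaces A's rescan of new_file for every key by a one-pass dict index keyed on l[0]
-- (built only when there are keys); equivalence proved on Pre_ (exactly where A returns).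

-- literal port of A's nested loops: for i in range(0, len(original_keys)): for l in new_file: …
def filtering_keys (original_keys : List String) (new_file : List (List String)) : List String :=
  (PySem.List.pyRange 0 original_keys.length 1).foldl
    (fun acc i =>
      new_file.foldl
        (fun acc2 l =>
          if PySem.List.pyGetD l 0 "" == PySem.List.pyGetD original_keys i "" then
            acc2 ++ [PySem.Str.join "\t" l]
          else acc2)
        acc)
    []

-- ===== PORT B =====
-- literal port of B: out = []; if original_keys: build index = {head ↦ joined lines}; out += index.get(k, [])
def filtering_keys_alt (original_keys : List String) (new_file : List (List String)) : List String :=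
  if original_keys.isEmpty then []
  else
    let index := new_file.foldl
      (fun d l => d.modify (PySem.List.pyGetD l 0 "") [] (· ++ [PySem.Str.join "\t" l]))
      PySem.Dict.empty
    original_keys.foldl (fun out k => out ++ index.getD k []) []

-- ===== PRECONDITION & SPEC =====
-- Pre_ excludes exactly the inputs where A raises IndexError: a non-empty key list together
-- with an empty row in new_file (A indexes l[0] for every row once there is a key; B likewise).
def Pre_filtering_keys (original_keys : List String) (new_file : List (List String)) : Prop :=
  original_keys = [] ∨ ∀ l ∈ new_file, l ≠ []
instance (original_keys : List String) (new_file : List (List String)) : Decidable (Pre_filtering_keys original_keys new_file) := by unfold Pre_filtering_keys; infer_instance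

def pvWitness_filtering_keys : List String × List (List String) :=
  (["a", "b"], [["a", "x"], ["c"], ["b", "y", "z"]])

def Spec_filtering_keys (original_keys : List String) (new_file : List (List String)) (out : List String) : Prop := out = filtering_keys_alt original_keys new_file
instance (original_keys : List String) (new_file : List (List String)) (out : List String) : Decidable (Spec_filtering_keys original_keys new_file out) := by unfold Spec_filtering_keys; infer_instance

-- ===== CLAIM (what is proved, stated in full; the proofs are below) =====
def Claim_equal_filtering_keys : Prop := ∀ (original_keys : List String) (new_file : List (List String)), Dom_filtering_keys original_keys new_file → Pre_filtering_keys original_keys new_file → Spec_filtering_keys original_keys new_file (filtering_keys original_keys new_file)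

-- ===== LEMMAS AND PROOFS =====

-- B's index, looked up at k, yields exactly the joined rows whose head equals k.
theorem pv_index_getD (new_file : List (List String)) (k : String) :
    (new_file.foldl
      (fun d l => d.modify (PySem.List.pyGetD l 0 "") [] (· ++ [PySem.Str.join "\t" l]))
      PySem.Dict.empty).getD k []
    = (new_file.filter (fun l => PySem.List.pyGetD l 0 "" == k)).map (PySem.Str.join "\t") := by
  have h :
      (new_file.foldl
        (fun d l => d.modify (PySem.List.pyGetD l 0 "") [] (· ++ [PySem.Str.join "\t" l]))
        PySem.Dict.empty)
      = ((new_file.map (fun l => (PySem.List.pyGetD l 0 "", PySem.Str.join "\t" l))).foldl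
          (fun d p => d.modify p.1 [] (· ++ [p.2])) PySem.Dict.empty) := by
    rw [List.foldl_map]
  rw [h, PySem.Dict.getD_foldl_modify_append, PySem.Dict.getD_empty]
  rw [List.filter_map]
  simp [List.map_map, Function.comp_def]

-- ===== VERDICT (by name: the statement is the Claim_ definition above) =====
theorem filtering_keys_spec : Claim_equal_filtering_keys := by
  intro keys nf _ _
  unfold Spec_filtering_keys filtering_keys filtering_keys_alt
  cases keys with
  | nil => simp [PySem.List.pyRange]
  | cons k0 ks =>
    simp only [List.isEmpty_cons, Bool.false_eq_true, if_false]
    rw [PySem.List.foldl_pyRange_zero_pyGetD' (k0 :: ks) ""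
      (fun acc k => nf.foldl
        (fun acc2 l => if PySem.List.pyGetD l 0 "" == k then acc2 ++ [PySem.Str.join "\t" l] else acc2)
        acc) []]
    simp only [pv_index_getD]
    apply PySem.List.foldl_congr_mem
    intro acc k _
    rw [PySem.List.foldl_append_if]
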